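-- pv_equiv track=rewrite | github.com/IVO-assistent/ivo-api | main.py | simple_rank
-- ===== SOURCE A (Python) =====
-- from typing import List, Optional, Tuple
--
-- def simple_rank(chunks: List[dict], query: str) -> List[dict]:
--     q = query.lower()
--     terms = [t for t in q.replace("/", " ").replace("-", " ").split() if len(t) > 2]
--     def score(c: str) -> int:
--         cl = c.lower()
--         s = 0
--         for t in terms:
--             if t in cl:
--                 s += 3
--         return s
--     return sorted(chunks, key=lambda x: score(x["content"]), reverse=True)
-- ===== SOURCE B (Python) =====
-- def simple_rank(chunks, query):
--     q = query.lower()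
--     terms = [t for t in q.replace("/", " ").replace("-", " ").split() if len(t) > 2]
--
--     def score(c):
--         cl = c.lower()
--         return 3 * len([t for t in terms if t in cl])
--
--     pairs = [(score(c["content"]), c) for c in chunks]
--     buckets = {}
--     for s, c in pairs:
--         buckets[s] = buckets.get(s, []) + [c]
--     out = []
--     for k in sorted(buckets, reverse=True):
--         out += buckets[k]
--     return out
-- ===== Notes on version B (the rewrite author's own statement) =====
-- stated objective: alternative
-- what changed: Replaces the comparison sort of the chunks by bucketing: each chunk is paired with its score once, a dict groups chunks by score in arrival order, and the result concatenates the buckets for the dict's keys sorted descending, reproducing the stable descending sort exactly.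
import Mathlib
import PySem

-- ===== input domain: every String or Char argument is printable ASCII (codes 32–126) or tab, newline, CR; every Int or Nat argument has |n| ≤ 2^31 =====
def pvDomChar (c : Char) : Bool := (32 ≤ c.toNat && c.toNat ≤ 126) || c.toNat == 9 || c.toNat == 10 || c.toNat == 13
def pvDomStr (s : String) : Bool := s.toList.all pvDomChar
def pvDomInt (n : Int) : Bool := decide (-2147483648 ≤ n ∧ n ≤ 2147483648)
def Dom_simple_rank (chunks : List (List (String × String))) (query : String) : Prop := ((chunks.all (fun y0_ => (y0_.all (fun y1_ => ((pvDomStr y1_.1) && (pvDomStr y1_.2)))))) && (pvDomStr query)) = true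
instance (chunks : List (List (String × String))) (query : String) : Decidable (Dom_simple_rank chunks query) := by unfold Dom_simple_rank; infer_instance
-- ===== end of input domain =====

-- B replaces the comparison sort by bucketing: a dict groups the chunks by score in arrival
-- order and the buckets are emitted for the keys sorted descending; equal stable result,
-- proved below. (objective: alternative)

-- ===== PORT A =====
-- terms = [t for t in query.lower().replace("/", " ").replace("-", " ").split() if len(t) > 2]
def pvTermsOf (query : String) : List String :=
  (PySem.Str.split₀ (PySem.Str.replace (PySem.Str.replace (PySem.Str.lower query) "/" " ") "-" " ")).filter
    (fun t => decide (2 < PySem.Str.len t))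

-- A's score: s = 0; for t in terms: if t in cl: s += 3
def pvScoreA (terms : List String) (c : String) : Int :=
  let cl := PySem.Str.lower c
  terms.foldl (fun s t => if PySem.Str.isIn t cl then s + 3 else s) 0

def simple_rank (chunks : List (List (String × String))) (query : String) : List (List (String × String)) :=
  let terms := pvTermsOf query
  PySem.List.sorted chunks (fun x => pvScoreA terms ((PySem.Dict.get? (PySem.Dict.mk x) "content").getD "")) true

-- ===== PORT B =====
-- B's score: 3 * len([t for t in terms if t in cl])
def pvScoreB (terms : List String) (c : String) : Int :=
  let cl := PySem.Str.lower c
  3 * ((terms.filter (fun t => PySem.Str.isIn t cl)).length : Int)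

-- pairs = [(score(c["content"]), c) for c in chunks]; buckets[s] = buckets.get(s, []) + [c];
-- out += buckets[k] for k in sorted(buckets, reverse=True)
def simple_rank_alt (chunks : List (List (String × String))) (query : String) : List (List (String × String)) :=
  let terms := pvTermsOf query
  let pairs : List (Int × List (String × String)) :=
    chunks.map (fun c => (pvScoreB terms ((PySem.Dict.get? (PySem.Dict.mk c) "content").getD ""), c))
  let buckets : PySem.Dict Int (List (List (String × String))) :=
    pairs.foldl (fun d p => d.modify p.1 [] (· ++ [p.2])) PySem.Dict.empty
  (PySem.List.sorted buckets.keys (fun k => k) true).foldl (fun out k => out ++ buckets.getD k []) []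

-- ===== PRECONDITION & SPEC =====
-- Pre_ excludes exactly the chunks without a "content" key, on which Python A raises KeyError.
def Pre_simple_rank (chunks : List (List (String × String))) (query : String) : Prop :=
  ∀ c ∈ chunks, (PySem.Dict.get? (PySem.Dict.mk c) "content").isSome = true
instance (chunks : List (List (String × String))) (query : String) : Decidable (Pre_simple_rank chunks query) := by unfold Pre_simple_rank; infer_instance

def pvWitness_simple_rank : (List (List (String × String))) × String :=
  ([[("content", "alpha beta")], [("content", "beta")]], "alpha/beta")

def Spec_simple_rank (chunks : List (List (String × String))) (query : String) (out : List (List (String × String))) : Prop := out = simple_rank_alt chunks query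
instance (chunks : List (List (String × String))) (query : String) (out : List (List (String × String))) : Decidable (Spec_simple_rank chunks query out) := by unfold Spec_simple_rank; infer_instance

-- ===== CLAIM (what is proved, stated in full; the proofs are below) =====
def Claim_equal_simple_rank : Prop := ∀ (chunks : List (List (String × String))) (query : String), Dom_simple_rank chunks query → Pre_simple_rank chunks query → Spec_simple_rank chunks query (simple_rank chunks query)

-- ===== LEMMAS AND PROOFS =====

-- A's "+3 per hit" accumulator is 3 times a count.
theorem pv_foldl_add3 (p : String → Bool) (l : List String) (a : Int) :
    l.foldl (fun s t => if p t then s + 3 else s) a = a + 3 * (l.countP p : Int) := by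
  induction l generalizing a with
  | nil => simp
  | cons h t ih =>
    by_cases hp : p h <;> simp [hp, ih] <;> ring

theorem pv_score_eq (terms : List String) (c : String) :
    pvScoreA terms c = pvScoreB terms c := by
  simp only [pvScoreA, pvScoreB]
  rw [pv_foldl_add3, List.countP_eq_length_filter]
  ring

-- filtering the (score, chunk) pairs at a key and dropping the scores is filtering the chunks
theorem pv_pairs_filter {α : Type} (g : α → Int) (k : Int) (xs : List α) :
    (((xs.map (fun c => (g c, c))).filter (fun p => p.1 == k)).map Prod.snd)
      = xs.filter (fun c => g c == k) := by
  induction xs with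
  | nil => rfl
  | cons h t ih =>
    by_cases hk : g h == k <;> simp [hk, ih]

-- insertBy for a reverse (descending, stable) sort: skip everything with key ≥ f x,
-- insert just before the first element with key < f x
theorem pv_insertBy_split {α : Type} (f : α → Int) (x : α) (L1 L2 : List α)
    (h1 : ∀ y ∈ L1, f x ≤ f y) (h2 : ∀ y, L2.head? = some y → f y < f x) :
    PySem.List.insertBy (fun a b => decide (f b < f a)) x (L1 ++ L2) = L1 ++ x :: L2 := by
  induction L1 with
  | nil =>
    cases L2 with
    | nil => rfl
    | cons y t =>
      have : f y < f x := h2 y rfl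
      simp [PySem.List.insertBy, this]
  | cons a l ih =>
    have ha : ¬ f a < f x := not_lt.mpr (h1 a (by simp))
    simp only [List.cons_append, PySem.List.insertBy, decide_eq_true_eq, ha, if_false]
    rw [ih (fun y hy => h1 y (by simp [hy]))]

theorem pv_flatMap_congr {α β : Type} (l : List α) (g h : α → List β)
    (hgh : ∀ a ∈ l, g a = h a) : l.flatMap g = l.flatMap h := by
  induction l with
  | nil => rfl
  | cons a t ih => simp [List.flatMap_cons, hgh a (by simp), ih (fun a ha => hgh a (by simp [ha]))]

-- a strictly descending list, after dropping the prefix > v, has all elements ≤ v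
theorem pv_dropWhile_desc_le (v : Int) (K : List Int) (hd : K.Pairwise (fun a b => b < a)) :
    ∀ k ∈ K.dropWhile (fun z => decide (v < z)), k ≤ v := by
  induction K with
  | nil => simp
  | cons a t ih =>
    rw [List.pairwise_cons] at hd
    intro k hk
    by_cases hva : v < a
    · rw [List.dropWhile_cons_of_pos (by simpa using hva)] at hk
      exact ih hd.2 k hk
    · rw [List.dropWhile_cons_of_neg (by simpa using hva)] at hk
      rcases List.mem_cons.mp hk with rfl | hkt
      · omega
      · have := hd.1 k hkt; omega

-- one append/insert step: inserting x into the bucketed list for xs gives the bucketed list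
-- for xs ++ [x], when the keys split strictly around f x
theorem pv_step {α : Type} (f : α → Int) (x : α) (xs : List α) (K1 K2 : List Int)
    (h1 : ∀ k ∈ K1, f x < k) (h2 : ∀ k ∈ K2, k < f x) :
    PySem.List.insertBy (fun a b => decide (f b < f a)) x
        (K1.flatMap (fun k => xs.filter (fun y => f y == k)) ++
          (xs.filter (fun y => f y == f x) ++ K2.flatMap (fun k => xs.filter (fun y => f y == k))))
      = (K1 ++ f x :: K2).flatMap (fun k => (xs ++ [x]).filter (fun y => f y == k)) := by
  have hF : ∀ (Ks : List Int) y, y ∈ Ks.flatMap (fun k => xs.filter (fun z => f z == k)) → f y ∈ Ks := by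
    intro Ks y hy
    rcases List.mem_flatMap.mp hy with ⟨k, hk, hyk⟩
    have : f y = k := by simpa using (List.mem_filter.mp hyk).2
    rwa [this]
  have hG : ∀ k, (xs ++ [x]).filter (fun y => f y == k)
      = xs.filter (fun y => f y == k) ++ if f x == k then [x] else [] := by
    intro k; rw [List.filter_append]; cases hfk : (f x == k) <;> simp [hfk]
  rw [← List.append_assoc]
  rw [pv_insertBy_split f x _ _ ?hc1 ?hc2]
  case hc1 =>
    intro y hy
    rcases List.mem_append.mp hy with hy1 | hy2
    · exact le_of_lt (h1 _ (hF K1 y hy1))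
    · have : f y = f x := by simpa using (List.mem_filter.mp hy2).2
      omega
  case hc2 =>
    intro y hy
    exact h2 _ (hF K2 y (List.mem_of_mem_head? hy))
  have e1 : List.flatMap (fun k => (xs ++ [x]).filter (fun y => f y == k)) K1
      = List.flatMap (fun k => xs.filter (fun y => f y == k)) K1 :=
    pv_flatMap_congr K1 _ _ (fun k hk => by
      rw [hG k, if_neg (by have := h1 k hk; simp only [beq_iff_eq]; omega), List.append_nil])
  have e2 : List.flatMap (fun k => (xs ++ [x]).filter (fun y => f y == k)) K2
      = List.flatMap (fun k => xs.filter (fun y => f y == k)) K2 :=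
    pv_flatMap_congr K2 _ _ (fun k hk => by
      rw [hG k, if_neg (by have := h2 k hk; simp only [beq_iff_eq]; omega), List.append_nil])
  rw [List.flatMap_append, List.flatMap_cons, e1, e2, hG (f x)]
  simp [List.append_assoc]

-- THE MAIN LEMMA: a stable descending sort equals concatenating, for each distinct key
-- value in descending order, the elements with that key in original order.
theorem pv_bucket_eq {α : Type} (f : α → Int) (xs : List α) :
    PySem.List.sorted xs f true
      = (PySem.List.sorted (PySem.Set.ofList (xs.map f)) (fun k => k) true).flatMap
          (fun k => xs.filter (fun y => f y == k)) := by
  induction xs using List.reverseRecOn with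
  | nil => rfl
  | append_singleton xs x ih =>
    set v := f x with hv_def
    set S := PySem.Set.ofList (xs.map f) with hS
    set K := PySem.List.sorted S (fun k : Int => k) true with hK
    have hKperm : K.Perm S := PySem.List.sorted_perm S (fun k : Int => k) true
    have hSnodup : S.Nodup := by rw [hS]; exact PySem.Set.nodup_ofList (xs.map f)
    have hKnodup : K.Nodup := hKperm.symm.nodup hSnodup
    have hdesc : K.Pairwise (fun a b => b < a) := by
      have h1 := PySem.List.sorted_pairwise_rev S (fun k : Int => k)
      rw [← hK] at h1
      exact (h1.and hKnodup).imp (fun h => lt_of_le_of_ne h.1 (Ne.symm h.2))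
    have hKmem : ∀ k, k ∈ K ↔ k ∈ xs.map f := fun k =>
      hKperm.mem_iff.trans (PySem.Set.mem_ofList _ _)
    have hsortstep : PySem.List.sorted (xs ++ [x]) f true
        = PySem.List.insertBy (fun a b => decide (f b < f a)) x (PySem.List.sorted xs f true) := by
      rw [PySem.List.sorted_rev_eq_foldl_insertBy, PySem.List.sorted_rev_eq_foldl_insertBy,
        List.foldl_append]
      rfl
    have hadd : PySem.Set.ofList ((xs ++ [x]).map f) = PySem.Set.add S v := by
      rw [List.map_append, PySem.Set.ofList_eq_foldl, List.foldl_append, ← PySem.Set.ofList_eq_foldl]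
      rfl
    have hsplit : K.takeWhile (fun z => decide (v < z)) ++ K.dropWhile (fun z => decide (v < z)) = K :=
      List.takeWhile_append_dropWhile
    set K1 := K.takeWhile (fun z => decide (v < z)) with hK1def
    set Kr := K.dropWhile (fun z => decide (v < z)) with hKrdef
    have hK1 : ∀ k ∈ K1, v < k := by
      intro k hk
      rw [hK1def] at hk
      simpa using List.mem_takeWhile_imp hk
    have hKrle : ∀ k ∈ Kr, k ≤ v := pv_dropWhile_desc_le v K hdesc
    have hdesc' : (K1 ++ Kr).Pairwise (fun a b => b < a) := by rw [hsplit]; exact hdesc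
    by_cases hv : v ∈ xs.map f
    · -- the score of x already occurs: the key list is unchanged, x joins its bucket
      have hvK : v ∈ K1 ++ Kr := by rw [hsplit]; exact (hKmem v).mpr hv
      have hvKr : v ∈ Kr := by
        rcases List.mem_append.mp hvK with h | h
        · exact absurd (hK1 v h) (lt_irrefl v)
        · exact h
      have haddS : PySem.Set.add S v = S := by
        have hvS : v ∈ S := (PySem.Set.mem_ofList _ _).mpr hv
        simp [PySem.Set.add, PySem.Set.contains, hvS]
      have hKrp : Kr.Pairwise (fun a b => b < a) := (List.pairwise_append.mp hdesc').2.1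
      cases hKr0 : Kr with
      | nil => rw [hKr0] at hvKr; cases hvKr
      | cons h t =>
        rw [hKr0] at hvKr hKrp
        have hveq : v = h := by
          rcases List.mem_cons.mp hvKr with h' | h'
          · exact h'
          · have h1' := (List.pairwise_cons.mp hKrp).1 v h'
            have h2' : h ≤ v := hKrle h (by rw [hKr0]; simp)
            omega
        have ht : ∀ k ∈ t, k < v := by
          intro k hk
          rw [hveq]
          exact (List.pairwise_cons.mp hKrp).1 k hk
        have hKeq : K = K1 ++ v :: t := by rw [← hsplit, hKr0, hveq]
        have step := pv_step f x xs K1 t hK1 ht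
        rw [← hv_def] at step
        rw [hsortstep, ih, hadd, haddS, ← hK, hKeq, List.flatMap_append, List.flatMap_cons]
        exact step
    · -- a new score value: it is spliced into the key list, alone in its bucket
      have hvK : v ∉ K := fun h => hv ((hKmem v).mp h)
      have hKr : ∀ k ∈ Kr, k < v := by
        intro k hk
        have hne : k ≠ v := by
          rintro rfl
          exact hvK (by rw [← hsplit]; exact List.mem_append_right _ hk)
        have := hKrle k hk
        omega
      have haddS : PySem.Set.add S v = S ++ [v] := by
        have hvS : v ∉ S := fun h => hv ((PySem.Set.mem_ofList _ _).mp h)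
        simp [PySem.Set.add, PySem.Set.contains, hvS]
      have hK'eq : PySem.List.sorted (S ++ [v]) (fun k : Int => k) true = K1 ++ v :: Kr := by
        apply PySem.List.sorted_rev_eq_of_perm_of_pairwise_gt
        · refine List.Perm.trans List.perm_middle ?_
          rw [hsplit]
          exact List.Perm.trans (hKperm.cons v) (List.perm_append_singleton v S).symm
        · rw [List.pairwise_append]
          refine ⟨(List.pairwise_append.mp hdesc').1, ?_, ?_⟩
          · rw [List.pairwise_cons]
            exact ⟨hKr, (List.pairwise_append.mp hdesc').2.1⟩
          · intro a ha b hb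
            rcases List.mem_cons.mp hb with rfl | hb'
            · exact hK1 a ha
            · have := hKr b hb'
              have := hK1 a ha
              omega
      have hFv : xs.filter (fun y => f y == v) = [] := by
        rw [List.filter_eq_nil_iff]
        intro y hy hbeq
        exact hv (List.mem_map.mpr ⟨y, hy, by simpa using hbeq⟩)
      have step := pv_step f x xs K1 Kr hK1 hKr
      rw [← hv_def, hFv, List.nil_append] at step
      rw [hsortstep, ih, hadd, haddS, hK'eq, ← hsplit, List.flatMap_append]
      exact step

-- B's bucket dict: lookup at k is the chunks scoring k, keys are the distinct scores in order
theorem pv_buckets_getD (pairs : List (Int × List (String × String))) (k : Int) :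
    (pairs.foldl (fun d p => d.modify p.1 [] (· ++ [p.2])) PySem.Dict.empty).getD k []
      = (pairs.filter (fun p => p.1 == k)).map Prod.snd := by
  rw [PySem.Dict.getD_foldl_modify_append, PySem.Dict.getD_empty, List.nil_append]

theorem pv_buckets_keys (pairs : List (Int × List (String × String))) :
    (pairs.foldl (fun d p => d.modify p.1 [] (· ++ [p.2])) PySem.Dict.empty).keys
      = PySem.Set.ofList (pairs.map Prod.fst) := by
  rw [PySem.Dict.keys_foldl_modify_key]
  rfl

-- ===== VERDICT (by name: the statement is the Claim_ definition above) =====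
theorem simple_rank_spec : Claim_equal_simple_rank := by
  intro chunks query _ _
  unfold Spec_simple_rank
  simp only [simple_rank, simple_rank_alt, pv_score_eq]
  rw [pv_buckets_keys, PySem.List.foldl_append_eq_flatMap, List.nil_append]
  simp only [pv_buckets_getD, pv_pairs_filter, List.map_map]
  exact pv_bucket_eq _ chunks
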